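-- pv_equiv track=rewrite | github.com/RodG23/EngWeb2024 | TPC3/json_reader.py | calc_generos
-- ===== SOURCE A (Python) =====
-- def pertenceB(genero, generos):
--     encontrado = False
--     i = 0
--     while i < len(generos) and not encontrado:
--         if generos[i]["nome"] == genero:
--             encontrado = True
--         i+=1
--
--     return encontrado
--
-- def calc_generos(bd):
--     generos = []
--     contador = 1
--     for registo in bd:
--         if registo.get('genres','erro') != 'erro':
--             for genero in registo.get('genres'):
--                 if not pertenceB(genero,generos):
--                     generos.append({
--                         "id" : f'g{contador}',
--                         "nome" : genero
--                     })
--                     contador += 1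
--     return generos
-- ===== SOURCE B (Python) =====
-- def calc_generos(bd):
--     # flatten genres of records that carry a 'genres' key
--     flat = [g for r in bd if r.get('genres', 'erro') != 'erro' for g in r.get('genres')]
--
--     # filter-ahead nub: keep the head, delete its later duplicates, recurse.
--     def nub(xs):
--         if not xs:
--             return []
--         head = xs[0]
--         return [head] + nub([y for y in xs[1:] if y != head])
--
--     return [{"id": f"g{i}", "nome": g} for i, g in enumerate(nub(flat), start=1)]
-- ===== Notes on version B (the rewrite author's own statement) =====
-- stated objective: alternative
-- what changed: Replaces A's interleaved build-and-scan (pertenceB linearly scanning the growing result for every genre while records are built) by flattening first and then deduplicating with a filter-ahead recursive nub that removes each head's later duplicates from the remainder before recursing, emitting the records in one final enumerate pass.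
import Mathlib
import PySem

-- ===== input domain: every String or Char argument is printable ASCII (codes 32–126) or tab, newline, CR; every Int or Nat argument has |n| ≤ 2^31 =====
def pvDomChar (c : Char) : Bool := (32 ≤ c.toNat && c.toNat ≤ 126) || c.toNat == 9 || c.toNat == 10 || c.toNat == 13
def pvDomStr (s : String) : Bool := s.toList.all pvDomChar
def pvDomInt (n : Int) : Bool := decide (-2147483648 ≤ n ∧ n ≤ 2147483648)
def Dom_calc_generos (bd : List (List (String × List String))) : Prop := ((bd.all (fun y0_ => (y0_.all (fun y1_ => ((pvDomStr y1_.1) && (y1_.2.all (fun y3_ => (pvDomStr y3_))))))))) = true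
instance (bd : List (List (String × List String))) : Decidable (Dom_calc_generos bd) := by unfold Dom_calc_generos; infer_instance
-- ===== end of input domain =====

-- B flattens first and deduplicates with a filter-ahead recursive nub (delete the
-- head's later duplicates, recurse), instead of A's interleaved build-and-scan
-- (pertenceB searching the growing result per genre); objective: alternative.

-- ===== PORT A =====
-- while-loop with early exit scans generos first-to-last; structural recursion is that scan.
-- generos[i]["nome"]: every dict calc_generos ever passes here carries key "nome", so the
-- get?-comparison is exact on those inputs.
def pertenceB (genero : String) (generos : List (List (String × String))) : Bool :=
  match generos with
  | [] => false
  | d :: rest =>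
    if PySem.Dict.get? (PySem.Dict.mk d) "nome" == some genero then true
    else pertenceB genero rest

-- registo.get('genres','erro') != 'erro' holds exactly when the key is present: the dict's
-- values are lists of strings and can never equal the string 'erro', so the match is exact.
def calc_generos (bd : List (List (String × List String))) : List (List (String × String)) :=
  (bd.foldl
    (fun (st : List (List (String × String)) × Int) registo =>
      match PySem.Dict.get? (PySem.Dict.mk registo) "genres" with
      | none => st
      | some gs =>
        gs.foldl
          (fun st genero =>
            if pertenceB genero st.1 then st
            else (st.1 ++ [[("id", "g" ++ PySem.Int.toStr st.2), ("nome", genero)]],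
                  st.2 + 1))
          st)
    ([], 1)).1

-- ===== PORT B =====
-- Source B's nub: keep the head, filter its duplicates out of the tail, recurse
def pvNub (xs : List String) : List String :=
  match xs with
  | [] => []
  | x :: rest => x :: pvNub (rest.filter (fun y => y != x))
termination_by xs.length
decreasing_by simpa using Nat.lt_succ_of_le (List.length_filter_le _ _)

-- same 'key present' reading of registo.get('genres','erro') != 'erro' as in port A
def calc_generos_alt (bd : List (List (String × List String))) : List (List (String × String)) :=
  let flat := bd.flatMap (fun registo =>
    match PySem.Dict.get? (PySem.Dict.mk registo) "genres" with
    | some gs => gs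
    | none => [])
  (PySem.List.enumerate (pvNub flat) 1).map
    (fun p => [("id", "g" ++ PySem.Int.toStr p.1), ("nome", p.2)])

-- ===== PRECONDITION & SPEC =====
def Spec_calc_generos (bd : List (List (String × List String))) (out : List (List (String × String))) : Prop := out = calc_generos_alt bd
instance (bd : List (List (String × List String))) (out : List (List (String × String))) : Decidable (Spec_calc_generos bd out) := by unfold Spec_calc_generos; infer_instance

-- ===== CLAIM (what is proved, stated in full; the proofs are below) =====
def Claim_equal_calc_generos : Prop := ∀ (bd : List (List (String × List String))), Dom_calc_generos bd → Spec_calc_generos bd (calc_generos bd)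

-- ===== LEMMAS AND PROOFS =====

/-- one output record -/
def pvEntry (i : Int) (nome : String) : List (String × String) :=
  [("id", "g" ++ PySem.Int.toStr i), ("nome", nome)]

/-- the output built from a list of (unique) names, ids starting at k -/
def pvBuild (k : Int) (us : List String) : List (List (String × String)) :=
  (PySem.List.enumerate us k).map (fun p => pvEntry p.1 p.2)

theorem pvBuild_nil (k : Int) : pvBuild k [] = [] := rfl

theorem pvBuild_cons (k : Int) (x : String) (us : List String) :
    pvBuild k (x :: us) = pvEntry k x :: pvBuild (k + 1) us := by
  simp [pvBuild, PySem.List.enumerate_cons]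

theorem pvBuild_append_singleton (k : Int) (us : List String) (x : String) :
    pvBuild k (us ++ [x]) = pvBuild k us ++ [pvEntry (k + us.length) x] := by
  simp [pvBuild, PySem.List.enumerate_append, PySem.List.enumerate_cons]

theorem pertenceB_build (g : String) (k : Int) (us : List String) :
    pertenceB g (pvBuild k us) = us.contains g := by
  induction us generalizing k with
  | nil => simp [pvBuild_nil, pertenceB]
  | cons x us ih =>
    rw [pvBuild_cons, pertenceB]
    by_cases hx : x = g
    · subst hx
      simp [pvEntry, PySem.Dict.get?_mk_cons]
    · have : PySem.Dict.get? (PySem.Dict.mk (pvEntry k x)) "nome" = some x := by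
        simp [pvEntry, PySem.Dict.get?_mk_cons]
      simp [this, hx, ih, Ne.symm hx]

/-- A's inner loop over one genre list realises PySem.Set.update on the name list. -/
theorem pv_inner (gs : List String) (us : List String) :
    gs.foldl
      (fun (st : List (List (String × String)) × Int) genero =>
        if pertenceB genero st.1 then st
        else (st.1 ++ [[("id", "g" ++ PySem.Int.toStr st.2), ("nome", genero)]],
              st.2 + 1))
      (pvBuild 1 us, (us.length : Int) + 1)
    = (pvBuild 1 (PySem.Set.update us gs), ((PySem.Set.update us gs).length : Int) + 1) := by
  induction gs generalizing us with
  | nil => simp [PySem.Set.update]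
  | cons g gs ih =>
    rw [List.foldl_cons, PySem.Set.update_cons]
    by_cases hg : us.contains g
    · have hg' : g ∈ us := by simpa using hg
      have hadd : PySem.Set.add us g = us := by simp [PySem.Set.add, hg']
      simp only [pertenceB_build, hg, if_pos]
      rw [hadd]; exact ih us
    · have hg' : g ∉ us := by simpa using hg
      have hadd : PySem.Set.add us g = us ++ [g] := by simp [PySem.Set.add, hg']
      simp only [pertenceB_build, hg, if_neg, Bool.false_eq_true, not_false_iff]
      have h1 : pvBuild 1 us ++ [[("id", "g" ++ PySem.Int.toStr ((us.length : Int) + 1)), ("nome", g)]]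
          = pvBuild 1 (us ++ [g]) := by
        rw [pvBuild_append_singleton]
        simp [pvEntry, Int.add_comm]
      rw [hadd, ← ih (us ++ [g]), h1]
      simp [Int.add_comm]

/-- the records whose 'genres' key is present, flattened -/
def pvFlat (bd : List (List (String × List String))) : List String :=
  bd.flatMap (fun registo =>
    match PySem.Dict.get? (PySem.Dict.mk registo) "genres" with
    | some gs => gs
    | none => [])

theorem pv_outer (bd : List (List (String × List String))) (us : List String) :
    bd.foldl
      (fun (st : List (List (String × String)) × Int) registo =>
        match PySem.Dict.get? (PySem.Dict.mk registo) "genres" with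
        | none => st
        | some gs =>
          gs.foldl
            (fun st genero =>
              if pertenceB genero st.1 then st
              else (st.1 ++ [[("id", "g" ++ PySem.Int.toStr st.2), ("nome", genero)]],
                    st.2 + 1))
            st)
      (pvBuild 1 us, (us.length : Int) + 1)
    = (pvBuild 1 (PySem.Set.update us (pvFlat bd)),
       ((PySem.Set.update us (pvFlat bd)).length : Int) + 1) := by
  induction bd generalizing us with
  | nil => simp [pvFlat, PySem.Set.update]
  | cons registo bd ih =>
    rw [List.foldl_cons]
    have hflat : pvFlat (registo :: bd)
        = (match PySem.Dict.get? (PySem.Dict.mk registo) "genres" with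
           | some gs => gs | none => []) ++ pvFlat bd := by
      simp [pvFlat]
    cases h : PySem.Dict.get? (PySem.Dict.mk registo) "genres" with
    | none =>
      simp only [h]
      rw [ih us, hflat, h]
      simp [PySem.Set.update]
    | some gs =>
      simp only [h]
      rw [pv_inner, ih (PySem.Set.update us gs), hflat, h, PySem.Set.update_append]

/-- Set.update skips elements already present, so pre-filtering them away changes nothing;
    the remaining new elements are exactly what filter-ahead nub appends. -/
theorem pv_update_eq_nub (xs : List String) (s : List String) :
    PySem.Set.update s xs = s ++ pvNub (xs.filter (fun y => !(s.contains y))) := by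
  induction xs generalizing s with
  | nil => simp [PySem.Set.update, pvNub]
  | cons x xs ih =>
    rw [PySem.Set.update_cons]
    by_cases hx : s.contains x
    · have hx' : x ∈ s := by simpa using hx
      have hadd : PySem.Set.add s x = s := by simp [PySem.Set.add, hx']
      rw [hadd, ih s, List.filter_cons_of_neg (by simp [hx'])]
    · have hx' : x ∉ s := by simpa using hx
      have hadd : PySem.Set.add s x = s ++ [x] := by simp [PySem.Set.add, hx']
      have hfil : xs.filter (fun y => !((s ++ [x]).contains y))
          = (xs.filter (fun y => !(s.contains y))).filter (fun y => y != x) := by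
        rw [List.filter_filter]
        apply List.filter_congr
        intro y _
        by_cases hy : y = x <;> simp [hy]
      rw [hadd, ih (s ++ [x]), hfil, List.filter_cons_of_pos (by simp [hx']), pvNub]
      simp

-- ===== VERDICT (by name: the statement is the Claim_ definition above) =====
theorem calc_generos_spec : Claim_equal_calc_generos := by
  intro bd _
  show calc_generos bd = calc_generos_alt bd
  have h0 : (([] : List (List (String × String))), (1 : Int))
      = (pvBuild 1 [], ((List.length ([] : List String) : Int)) + 1) := by
    simp [pvBuild_nil]
  unfold calc_generos
  rw [h0, pv_outer]
  have : PySem.Set.update ([] : List String) (pvFlat bd) = pvNub (pvFlat bd) := by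
    rw [pv_update_eq_nub]
    simp
  rw [this]
  rfl
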